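-- pv_equiv track=rewrite | github.com/DavidLKing/genpara | amadAligns/bipartiteDepTest.py | getIdxMap
-- ===== SOURCE A (Python) =====
-- def getIdxMap(sent):
--     offset = 0
--     idxMap = dict()
--     for idx, token in enumerate(sent):
--         idxMap[idx] = set()
--         loc = idx + offset
--         idxMap[idx].add(loc)
--         if '-' in token:
--             for letter in token:
--                 if letter == "-":
--                     offset += 1
--                     loc = idx + offset
--                     idxMap[idx].add(loc)
--     return idxMap
-- ===== SOURCE B (Python) =====
-- def getIdxMap(sent):
--     # pass 1: per-token dash counts and running prefix offsets
--     counts = [sum(1 for ch in t if ch == '-') for t in sent]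
--     offs = []
--     total = 0
--     for c in counts:
--         offs.append(total)
--         total += c
--     # pass 2: each token's set is a contiguous range of shifted locations
--     return {i: set(range(i + o, i + o + c + 1))
--             for i, (o, c) in enumerate(zip(offs, counts))}
-- ===== Notes on version B (the rewrite author's own statement) =====
-- stated objective: alternative
-- what changed: Replaces the single stateful loop that mutates a running offset and grows each set dash-by-dash with two separate passes: a prefix-sum table of dash counts, then a comprehension building each set as one contiguous range.
import Mathlib
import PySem

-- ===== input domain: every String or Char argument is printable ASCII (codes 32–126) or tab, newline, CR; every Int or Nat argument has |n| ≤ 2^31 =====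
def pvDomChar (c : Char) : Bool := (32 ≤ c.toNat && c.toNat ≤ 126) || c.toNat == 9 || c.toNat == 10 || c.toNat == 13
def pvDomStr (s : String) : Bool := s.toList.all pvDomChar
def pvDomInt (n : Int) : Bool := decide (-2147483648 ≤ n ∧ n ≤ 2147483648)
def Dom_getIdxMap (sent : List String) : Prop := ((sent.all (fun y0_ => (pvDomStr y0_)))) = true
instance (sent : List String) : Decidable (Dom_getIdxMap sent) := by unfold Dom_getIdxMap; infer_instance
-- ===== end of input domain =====

-- B restates A's stateful offset loop as a prefix-sum table of dash counts plus a
-- range-comprehension pass (alternative decomposition, same cost; return value only).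

-- ===== PORT A =====
-- inner 'for letter in token' loop body
def getIdxMapA_letter (idx : Int) (st : Int × PySem.Set Int) (letter : Char) : Int × PySem.Set Int :=
  if letter == '-' then
    let offset := st.1 + 1
    let loc := idx + offset
    (offset, st.2.add loc)
  else st

-- body of 'for idx, token in enumerate(sent)'
def getIdxMapA_step (st : Int × PySem.Dict Int (PySem.Set Int)) (p : Int × String) :
    Int × PySem.Dict Int (PySem.Set Int) :=
  let idx := p.1
  let token := p.2
  let s : PySem.Set Int := PySem.Set.add PySem.Set.empty (idx + st.1)
  let r : Int × PySem.Set Int :=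
    if PySem.Str.isIn "-" token then token.toList.foldl (getIdxMapA_letter idx) (st.1, s)
    else (st.1, s)
  (r.1, st.2.insert idx r.2)

def getIdxMap (sent : List String) : List (Int × List Int) :=
  (((PySem.List.enumerate sent 0).foldl getIdxMapA_step (0, PySem.Dict.empty)).2).items

-- ===== PORT B =====
-- counts = [sum(1 for ch in t if ch == '-') for t in sent]
def getIdxMapB_cnt (t : String) : Int :=
  t.toList.foldl (fun acc ch => if ch == '-' then acc + 1 else acc) 0

def getIdxMap_alt (sent : List String) : List (Int × List Int) :=
  let counts : List Int := sent.map getIdxMapB_cnt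
  let acc := counts.foldl (fun (acc : List Int × Int) c => (acc.1 ++ [acc.2], acc.2 + c)) ([], 0)
  let offs := acc.1
  (PySem.List.enumerate (offs.zip counts) 0).map
    (fun q => (q.1, PySem.Set.ofList (PySem.List.pyRange (q.1 + q.2.1) (q.1 + q.2.1 + q.2.2 + 1) 1)))

-- ===== PRECONDITION & SPEC =====
def Spec_getIdxMap (sent : List String) (out : List (Int × List Int)) : Prop := out = getIdxMap_alt sent
instance (sent : List String) (out : List (Int × List Int)) : Decidable (Spec_getIdxMap sent out) := by unfold Spec_getIdxMap; infer_instance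

-- ===== CLAIM (what is proved, stated in full; the proofs are below) =====
def Claim_equal_getIdxMap : Prop := ∀ (sent : List String), Dom_getIdxMap sent → Spec_getIdxMap sent (getIdxMap sent)

-- ===== LEMMAS AND PROOFS =====

-- the common value both programs produce, token by token
def outSpec : List String → Int → Int → List (Int × List Int)
  | [], _, _ => []
  | t :: ts, i, off =>
      (i, PySem.List.pyRange (i + off) (i + off + getIdxMapB_cnt t + 1) 1)
        :: outSpec ts (i + 1) (off + getIdxMapB_cnt t)

-- the prefix-offset list B tabulates
def offsAux : Int → List Int → List Int
  | _, [] => []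
  | off, c :: cs => off :: offsAux (off + c) cs

lemma foldl_offs (cs : List Int) : ∀ (pre : List Int) (tot : Int),
    cs.foldl (fun (acc : List Int × Int) c => (acc.1 ++ [acc.2], acc.2 + c)) (pre, tot)
      = (pre ++ offsAux tot cs, tot + cs.sum) := by
  induction cs with
  | nil => simp [offsAux]
  | cons c cs ih =>
      intro pre tot
      simp only [List.foldl_cons, ih, offsAux, List.sum_cons]
      rw [Prod.mk.injEq]
      exact ⟨by simp, by ring⟩

lemma cnt_eq_countP (t : String) :
    getIdxMapB_cnt t = (t.toList.countP (fun ch => ch == '-') : Int) := by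
  unfold getIdxMapB_cnt
  rw [PySem.List.foldl_count_if]
  ring

lemma letter_loop (cs : List Char) : ∀ (idx off lo : Int), lo ≤ idx + off →
    cs.foldl (getIdxMapA_letter idx) (off, PySem.List.pyRange lo (idx + off + 1) 1)
      = (off + (cs.countP (fun ch => ch == '-') : Int),
         PySem.List.pyRange lo (idx + off + (cs.countP (fun ch => ch == '-') : Int) + 1) 1) := by
  induction cs with
  | nil => intro idx off lo h; simp
  | cons c cs ih =>
      intro idx off lo h
      by_cases hc : c = '-'
      · subst hc
        have hnot : idx + off + 1 ∉ PySem.List.pyRange lo (idx + off + 1) 1 := by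
          simp [PySem.List.mem_pyRange_one]
        have e1 : idx + (off + 1) = idx + off + 1 := by ring
        have hstep : getIdxMapA_letter idx (off, PySem.List.pyRange lo (idx + off + 1) 1) '-'
            = (off + 1, PySem.List.pyRange lo (idx + off + 1 + 1) 1) := by
          simp only [getIdxMapA_letter, beq_self_eq_true, if_true]
          rw [Prod.mk.injEq]
          refine ⟨rfl, ?_⟩
          rw [e1, PySem.Set.add_of_not_mem hnot,
            ← PySem.List.pyRange_one_succ_right (by omega)]
        have e2 : idx + off + 1 + 1 = idx + (off + 1) + 1 := by ring
        rw [List.foldl_cons, hstep, e2, ih idx (off + 1) lo (by omega),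
          List.countP_cons_of_pos (by simp)]
        rw [Prod.mk.injEq]
        refine ⟨by push_cast; ring, ?_⟩
        congr 1
        push_cast
        ring
      · have hstep : getIdxMapA_letter idx (off, PySem.List.pyRange lo (idx + off + 1) 1) c
            = (off, PySem.List.pyRange lo (idx + off + 1) 1) := by
          simp [getIdxMapA_letter, hc]
        rw [List.foldl_cons, hstep, ih idx off lo h,
          List.countP_cons_of_neg (by simp [hc])]

-- one token of A's loop produces exactly the contiguous range
lemma step_eq (idx off : Int) (t : String) (d : PySem.Dict Int (PySem.Set Int)) :
    getIdxMapA_step (off, d) (idx, t)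
      = (off + getIdxMapB_cnt t,
         d.insert idx (PySem.List.pyRange (idx + off) (idx + off + getIdxMapB_cnt t + 1) 1)) := by
  have hs0 : PySem.Set.add (PySem.Set.empty) (idx + off)
      = PySem.List.pyRange (idx + off) (idx + off + 1) 1 := by
    simp [PySem.Set.add, PySem.Set.empty, PySem.Set.contains, PySem.List.pyRange_one_singleton]
  unfold getIdxMapA_step
  by_cases hin : PySem.Str.isIn "-" t
  · rw [cnt_eq_countP]
    simp only [hin, if_pos, hs0]
    rw [letter_loop t.toList idx off (idx + off) (le_refl _)]
  · have hmem : '-' ∉ t.toList := by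
      have := PySem.Chars.isIn_eq_false_iff (sub := "-".toList) (s := t.toList)
      simp only [PySem.Str.isIn_eq] at hin
      rw [Bool.not_eq_true, this] at hin
      intro hm
      exact hin ((List.singleton_infix_iff '-' t.toList).mpr hm)
    have hc : getIdxMapB_cnt t = 0 := by
      rw [cnt_eq_countP, List.countP_eq_zero.mpr (by intro a ha; simp; rintro rfl; exact hmem ha)]
      simp
    simp only [hin, if_neg, Bool.false_eq_true, not_false_iff, hs0, hc, add_zero]

-- A's whole loop, generalized over start index, offset and accumulated dict
lemma A_loop (toks : List String) : ∀ (i off : Int) (d : PySem.Dict Int (PySem.Set Int)),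
    (∀ j : Int, i ≤ j → d.contains j = false) →
    (((PySem.List.enumerate toks i).foldl getIdxMapA_step (off, d)).2).items
      = d.items ++ outSpec toks i off := by
  induction toks with
  | nil => intro i off d _; simp [PySem.List.enumerate, outSpec]
  | cons t ts ih =>
      intro i off d hd
      rw [PySem.List.enumerate_cons, List.foldl_cons, step_eq]
      rw [ih (i + 1) (off + getIdxMapB_cnt t) _ ?_]
      · rw [PySem.Dict.items_insert_of_not_contains _ _ (hd i (le_refl i))]
        simp [outSpec]
      · intro j hj
        rw [PySem.Dict.contains_insert]
        have : (j == i) = false := by simp; omega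
        rw [this, Bool.false_or]
        exact hd j (by omega)

-- B's map over the zipped prefix table, generalized the same way
lemma B_map (toks : List String) : ∀ (i off : Int),
    (PySem.List.enumerate ((offsAux off (toks.map getIdxMapB_cnt)).zip (toks.map getIdxMapB_cnt)) i).map
        (fun q => (q.1, PySem.Set.ofList (PySem.List.pyRange (q.1 + q.2.1) (q.1 + q.2.1 + q.2.2 + 1) 1)))
      = outSpec toks i off := by
  induction toks with
  | nil => intro i off; simp [offsAux, outSpec]
  | cons t ts ih =>
      intro i off
      simp only [List.map_cons, offsAux, List.zip_cons_cons, PySem.List.enumerate_cons,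
        List.map_cons, outSpec]
      rw [ih (i + 1) (off + getIdxMapB_cnt t)]
      rw [PySem.Set.ofList_eq_self_of_nodup _ (PySem.List.nodup_pyRange_one _ _)]

-- ===== VERDICT (by name: the statement is the Claim_ definition above) =====
theorem getIdxMap_spec : Claim_equal_getIdxMap := by
  intro sent _
  show getIdxMap sent = getIdxMap_alt sent
  simp only [getIdxMap, getIdxMap_alt, foldl_offs, List.nil_append]
  rw [A_loop sent 0 0 PySem.Dict.empty (fun j _ => PySem.Dict.contains_empty j), B_map sent 0 0]
  simp [PySem.Dict.empty]
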